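-- pv_equiv track=rewrite | github.com/IsraelOni/School_Projects | Assignment2.py | generate_context_target_pairs
-- ===== SOURCE A (Python) =====
-- def generate_context_target_pairs(tokenized_sentences, window_size):
--     contexts = []
--     targets = []
--     for sentence in tokenized_sentences:
--         for idx, word in enumerate(sentence):
--             start_index = max(0, idx - window_size)
--             end_index = min(len(sentence), idx + window_size + 1)
--
--             # Initialize context for each target word
--             context = []
--             for i in range(start_index, end_index):
--                 if i != idx:
--                     context.append(sentence[i])
--
--             target = word
--             if len(context) == window_size*2:
--                 contexts.append(context)
--                 targets.append(target)
--     return contexts, targets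
-- ===== SOURCE B (Python) =====
-- def generate_context_target_pairs(tokenized_sentences, window_size):
--     pairs = [(ctx, s[i])
--              for s in tokenized_sentences
--              for i in range(len(s))
--              if len(ctx := s[max(i - window_size, 0):i] + s[i + 1:i + window_size + 1])
--                 == 2 * window_size]
--     return [c for c, _ in pairs], [t for _, t in pairs]
-- ===== Notes on version B (the rewrite author's own statement) =====
-- stated objective: simpler
-- what changed: Replaces the nested accumulator loops with their inner per-index scan and i!=idx guard by a single comprehension that builds each context from two list slices and collects (context, target) pairs, then unzips them; the len(context)==2*window_size filter is kept, so behaviour is identical including window_size<=0.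
import Mathlib
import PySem

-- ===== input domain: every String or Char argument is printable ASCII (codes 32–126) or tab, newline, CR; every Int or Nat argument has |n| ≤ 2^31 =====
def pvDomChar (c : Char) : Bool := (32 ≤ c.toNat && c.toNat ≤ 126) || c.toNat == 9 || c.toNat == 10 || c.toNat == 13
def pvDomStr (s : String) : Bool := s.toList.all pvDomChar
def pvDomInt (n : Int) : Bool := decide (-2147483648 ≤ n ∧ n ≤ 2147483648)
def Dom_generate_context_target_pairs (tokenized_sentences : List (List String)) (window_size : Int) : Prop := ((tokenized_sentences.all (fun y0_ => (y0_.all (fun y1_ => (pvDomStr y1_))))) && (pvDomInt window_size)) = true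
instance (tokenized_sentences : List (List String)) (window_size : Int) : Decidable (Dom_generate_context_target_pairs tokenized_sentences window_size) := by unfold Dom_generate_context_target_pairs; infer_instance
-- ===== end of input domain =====

-- B replaces A's nested accumulator loops (inner index scan with an `i != idx` guard) by a
-- comprehension building (context, target) pairs from two slices, then unzips; same behaviour.

-- ===== PORT A =====
def generate_context_target_pairs (tokenized_sentences : List (List String)) (window_size : Int) : List (List String) × List String :=
  tokenized_sentences.foldl (fun acc sentence =>
    (PySem.List.enumerate sentence 0).foldl (fun acc p =>
      let idx := p.1
      let word := p.2
      let start_index := max 0 (idx - window_size)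
      let end_index := min (sentence.length : Int) (idx + window_size + 1)
      let context := (PySem.List.pyRange start_index end_index 1).foldl
        (fun c i => if i ≠ idx then c ++ [PySem.List.pyGetD sentence i ""] else c) []
      let target := word
      if (context.length : Int) = window_size * 2 then (acc.1 ++ [context], acc.2 ++ [target]) else acc)
      acc) ([], [])

-- ===== PORT B =====
def generate_context_target_pairs_alt (tokenized_sentences : List (List String)) (window_size : Int) : List (List String) × List String :=
  let pairs := tokenized_sentences.flatMap (fun s =>
    (List.range s.length).filterMap (fun i : Nat =>
      let ctx := PySem.List.slice s (some (max ((i : Int) - window_size) 0)) (some (i : Int)) ++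
                 PySem.List.slice s (some ((i : Int) + 1)) (some ((i : Int) + window_size + 1))
      if (ctx.length : Int) = 2 * window_size then some (ctx, s.getD i "") else none))
  (pairs.map Prod.fst, pairs.map Prod.snd)

-- ===== PRECONDITION & SPEC =====
def Spec_generate_context_target_pairs (tokenized_sentences : List (List String)) (window_size : Int) (out : List (List String) × List String) : Prop := out = generate_context_target_pairs_alt tokenized_sentences window_size
instance (tokenized_sentences : List (List String)) (window_size : Int) (out : List (List String) × List String) : Decidable (Spec_generate_context_target_pairs tokenized_sentences window_size out) := by unfold Spec_generate_context_target_pairs; infer_instance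

-- ===== CLAIM (what is proved, stated in full; the proofs are below) =====
def Claim_equal_generate_context_target_pairs : Prop := ∀ (tokenized_sentences : List (List String)) (window_size : Int), Dom_generate_context_target_pairs tokenized_sentences window_size → Spec_generate_context_target_pairs tokenized_sentences window_size (generate_context_target_pairs tokenized_sentences window_size)

-- ===== LEMMAS AND PROOFS =====

/-- `[s.getD (n+k) for k in range m] = (s.drop n).take m` when all indices are in range. -/
lemma map_getD_range_drop (s : List String) (n : Nat) :
    ∀ m : Nat, n + m ≤ s.length →
      (List.range m).map (fun k => s.getD (n + k) "") = (s.drop n).take m := by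
  intro m
  induction m with
  | zero => intro _; simp
  | succ m ih =>
    intro h
    rw [List.range_succ, List.map_append, ih (by omega), List.map_singleton]
    have hlt : n + m < s.length := by omega
    rw [List.take_add_one]
    have hidx : (s.drop n)[m]? = some s[n + m] := by
      rw [List.getElem?_drop]
      exact List.getElem?_eq_getElem hlt
    rw [hidx]
    simp [List.getD_eq_getElem?_getD, List.getElem?_eq_getElem hlt]

/-- Mapping lookup over an index range is a slice, for in-range natural bounds. -/
lemma map_get_pyRange (s : List String) (a b : Int) (ha : 0 ≤ a) (ha2 : a ≤ (s.length : Int))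
    (hb0 : 0 ≤ b) (hb : b ≤ (s.length : Int)) :
    (PySem.List.pyRange a b 1).map (fun i => PySem.List.pyGetD s i "") =
      PySem.List.slice s (some a) (some b) := by
  rw [PySem.List.pyRange_one, PySem.List.slice_toNat s ha hb0, List.map_map]
  have hcomp : ((fun i => PySem.List.pyGetD s i "") ∘ fun k : Nat => a + (k : Int)) =
      (fun k : Nat => s.getD (a.toNat + k) "") := by
    funext k
    have h1 : a + (k : Int) = ((a.toNat + k : Nat) : Int) := by omega
    simp only [Function.comp]
    rw [h1, PySem.List.pyGetD_natCast]
  rw [hcomp, map_getD_range_drop s a.toNat ((b - a).toNat) (by omega)]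
  congr 1
  omega

/-- A slice with nonnegative bounds may clamp its right bound to the length. -/
lemma slice_clamp_right (s : List String) (a b : Int) (ha : 0 ≤ a) (hb : 0 ≤ b) :
    PySem.List.slice s (some a) (some b) =
      PySem.List.slice s (some a) (some (min (s.length : Int) b)) := by
  rw [PySem.List.slice_toNat s ha hb,
      PySem.List.slice_toNat s ha (b := min (s.length : Int) b) (by omega)]
  by_cases hle : b ≤ (s.length : Int)
  · rw [min_eq_right hle]
  · have hmin : min (s.length : Int) b = (s.length : Int) := by omega
    rw [hmin]
    have hlen : (s.drop a.toNat).length = s.length - a.toNat := by simp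
    rw [List.take_of_length_le (by omega), List.take_of_length_le (by omega)]

/-- A's inner index loop over `range(start_index, end_index)` builds exactly B's two slices. -/
lemma context_eq_slices (s : List String) (w : Int) (k : Nat) (hk : k < s.length) (hw : 0 ≤ w) :
    (PySem.List.pyRange (max 0 ((k : Int) - w)) (min ((s.length : Int)) ((k : Int) + w + 1)) 1).foldl
        (fun c i => if i ≠ (k : Int) then c ++ [PySem.List.pyGetD s i ""] else c) [] =
      PySem.List.slice s (some (max ((k : Int) - w) 0)) (some (k : Int)) ++
        PySem.List.slice s (some ((k : Int) + 1)) (some ((k : Int) + w + 1)) := by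
  set a : Int := max 0 ((k : Int) - w) with ha_def
  set e : Int := min ((s.length : Int)) ((k : Int) + w + 1) with he_def
  have ha0 : 0 ≤ a := le_max_left _ _
  have hak : a ≤ (k : Int) := by rw [ha_def]; simp; omega
  have hke : (k : Int) < e := by rw [he_def]; simp; omega
  have he_le : e ≤ (s.length : Int) := min_le_left _ _
  rw [PySem.List.foldl_append_ite (fun i => i ≠ (k : Int)) (fun i => PySem.List.pyGetD s i "")]
  rw [PySem.List.pyRange_one_append a (k : Int) e hak (le_of_lt hke),
      PySem.List.pyRange_one_cons hke]
  rw [List.filter_append, List.filter_cons_of_neg (by simp)]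
  have hfl : (PySem.List.pyRange a (k : Int) 1).filter (fun x => decide (x ≠ (k : Int))) =
      PySem.List.pyRange a (k : Int) 1 := by
    apply List.filter_eq_self.mpr
    intro x hx
    have := (PySem.List.mem_pyRange_one).mp hx
    simp; omega
  have hfr : (PySem.List.pyRange ((k : Int) + 1) e 1).filter (fun x => decide (x ≠ (k : Int))) =
      PySem.List.pyRange ((k : Int) + 1) e 1 := by
    apply List.filter_eq_self.mpr
    intro x hx
    have := (PySem.List.mem_pyRange_one).mp hx
    simp; omega
  rw [hfl, hfr, List.map_append]
  rw [map_get_pyRange s a (k : Int) ha0 (by omega) (by omega) (by omega),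
      map_get_pyRange s ((k : Int) + 1) e (by omega) (by omega) (by omega) he_le]
  rw [slice_clamp_right s ((k : Int) + 1) ((k : Int) + w + 1) (by omega) (by omega)]
  rw [List.nil_append, ha_def, he_def, max_comm]

/-- Generic shape: a fold appending the two components of each produced pair
    is the unzip of a `filterMap`. -/
lemma foldl_filterMap_pairs {α β γ : Type} (g : α → Option (β × γ)) (l : List α) :
    ∀ acc : List β × List γ,
      l.foldl (fun acc x => (g x).elim acc (fun p => (acc.1 ++ [p.1], acc.2 ++ [p.2]))) acc =
      (acc.1 ++ (l.filterMap g).map Prod.fst, acc.2 ++ (l.filterMap g).map Prod.snd) := by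
  induction l with
  | nil => intro acc; simp
  | cons x xs ih =>
    intro acc
    rw [List.foldl_cons, List.filterMap_cons]
    cases g x with
    | none => simp only [Option.elim_none]; rw [ih]
    | some p => simp only [Option.elim_some]; rw [ih]; simp

/-- Generic shape: a fold appending per-element blocks to both components is a pair of flatMaps. -/
lemma foldl_pair_append {α β γ : Type} (f : α → List β) (h : α → List γ) (l : List α) :
    ∀ acc : List β × List γ,
      l.foldl (fun acc s => (acc.1 ++ f s, acc.2 ++ h s)) acc =
      (acc.1 ++ l.flatMap f, acc.2 ++ l.flatMap h) := by
  induction l with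
  | nil => intro acc; simp
  | cons x xs ih => intro acc; rw [List.foldl_cons, ih]; simp

/-- B's per-index pair generator (the body of the comprehension in B). -/
def pvGen (w : Int) (s : List String) (i : Nat) : Option (List String × String) :=
  let ctx := PySem.List.slice s (some (max ((i : Int) - w) 0)) (some (i : Int)) ++
             PySem.List.slice s (some ((i : Int) + 1)) (some ((i : Int) + w + 1))
  if (ctx.length : Int) = 2 * w then some (ctx, s.getD i "") else none

/-- Pointwise: A's per-word step equals dispatching on B's generator. -/
lemma point_eq (s : List String) (w : Int) (k : Nat) (hk : k < s.length)
    (acc : List (List String) × List String) :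
    (if (((PySem.List.pyRange (max 0 ((k : Int) - w)) (min ((s.length : Int)) ((k : Int) + w + 1)) 1).foldl
          (fun c i => if i ≠ (k : Int) then c ++ [PySem.List.pyGetD s i ""] else c) []).length : Int) = w * 2
       then (acc.1 ++ [(PySem.List.pyRange (max 0 ((k : Int) - w)) (min ((s.length : Int)) ((k : Int) + w + 1)) 1).foldl
          (fun c i => if i ≠ (k : Int) then c ++ [PySem.List.pyGetD s i ""] else c) []],
             acc.2 ++ [PySem.List.pyGetD s (k : Int) ""])
       else acc) =
    ((pvGen w s k).elim acc (fun p => (acc.1 ++ [p.1], acc.2 ++ [p.2]))) := by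
  unfold pvGen
  by_cases hw : 0 ≤ w
  · rw [context_eq_slices s w k hk hw, PySem.List.pyGetD_natCast,
        show w * 2 = 2 * w from by ring]
    by_cases hc : (((PySem.List.slice s (some (max ((k : Int) - w) 0)) (some (k : Int)) ++
          PySem.List.slice s (some ((k : Int) + 1)) (some ((k : Int) + w + 1))).length : Int) = 2 * w)
    · rw [if_pos hc, if_pos hc]
      rfl
    · rw [if_neg hc, if_neg hc]
      rfl
  · have h2 : w * 2 < 0 := by omega
    rw [if_neg (by intro h; omega), if_neg (by intro h; omega)]
    rfl

/-- Per sentence: A's inner `enumerate` fold appends exactly B's unzipped pairs. -/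
lemma sentence_eq (s : List String) (w : Int) (acc : List (List String) × List String) :
    (PySem.List.enumerate s 0).foldl (fun acc p =>
        if (((PySem.List.pyRange (max 0 (p.1 - w)) (min ((s.length : Int)) (p.1 + w + 1)) 1).foldl
              (fun c i => if i ≠ p.1 then c ++ [PySem.List.pyGetD s i ""] else c) []).length : Int) = w * 2
        then (acc.1 ++ [(PySem.List.pyRange (max 0 (p.1 - w)) (min ((s.length : Int)) (p.1 + w + 1)) 1).foldl
              (fun c i => if i ≠ p.1 then c ++ [PySem.List.pyGetD s i ""] else c) []], acc.2 ++ [p.2])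
        else acc) acc =
    (acc.1 ++ ((List.range s.length).filterMap (pvGen w s)).map Prod.fst,
     acc.2 ++ ((List.range s.length).filterMap (pvGen w s)).map Prod.snd) := by
  rw [show (PySem.List.enumerate s 0) = (PySem.List.enumerate s) from rfl,
      PySem.List.enumerate_eq_map_pyRange s "", List.foldl_map]
  have hlen : PySem.List.len s = ((s.length : Nat) : Int) := by simp
  rw [hlen, PySem.List.pyRange_zero_natCast, List.foldl_map]
  rw [PySem.List.foldl_congr_mem _ _
      (fun acc (x : Nat) => (pvGen w s x).elim acc (fun p => (acc.1 ++ [p.1], acc.2 ++ [p.2]))) acc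
      (by
        intro acc k hkmem
        have hk : k < s.length := List.mem_range.mp hkmem
        exact point_eq s w k hk acc)]
  exact foldl_filterMap_pairs (pvGen w s) (List.range s.length) acc

-- ===== VERDICT (by name: the statement is the Claim_ definition above) =====
theorem generate_context_target_pairs_spec : Claim_equal_generate_context_target_pairs := by
  intro ts w _
  unfold Spec_generate_context_target_pairs generate_context_target_pairs generate_context_target_pairs_alt
  simp only []
  have houter : ts.foldl (fun acc sentence =>
      (PySem.List.enumerate sentence 0).foldl (fun acc p =>
        if (((PySem.List.pyRange (max 0 (p.1 - w)) (min ((sentence.length : Int)) (p.1 + w + 1)) 1).foldl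
              (fun c i => if i ≠ p.1 then c ++ [PySem.List.pyGetD sentence i ""] else c) []).length : Int) = w * 2
        then (acc.1 ++ [(PySem.List.pyRange (max 0 (p.1 - w)) (min ((sentence.length : Int)) (p.1 + w + 1)) 1).foldl
              (fun c i => if i ≠ p.1 then c ++ [PySem.List.pyGetD sentence i ""] else c) []], acc.2 ++ [p.2])
        else acc) acc) ([], []) =
      ts.foldl (fun acc s =>
        (acc.1 ++ ((List.range s.length).filterMap (pvGen w s)).map Prod.fst,
         acc.2 ++ ((List.range s.length).filterMap (pvGen w s)).map Prod.snd)) ([], []) := by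
    apply PySem.List.foldl_congr_mem
    intro acc s _
    exact sentence_eq s w acc
  rw [houter, foldl_pair_append (fun s => ((List.range s.length).filterMap (pvGen w s)).map Prod.fst)
      (fun s => ((List.range s.length).filterMap (pvGen w s)).map Prod.snd) ts ([], [])]
  rw [← List.map_flatMap, ← List.map_flatMap]
  rfl
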